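-- pv_equiv track=rewrite | github.com/Fly143/MiMo2API | app/tool_call.py | _is_inside_think
-- ===== SOURCE A (Python) =====
-- THINK_OPEN = "<think>"
--
-- THINK_CLOSE = "</think>"
--
-- def _is_inside_think(text: str, pos: int) -> bool:
--     """检查 pos 是否在 <think>...</think> 块内部。"""
--     sf = 0
--     while True:
--         s = text.find(THINK_OPEN, sf)
--         if s == -1:
--             break
--         e = text.find(THINK_CLOSE, s + 7)
--         if e == -1:
--             return pos >= s
--         if s <= pos < e + 8:
--             return True
--         sf = e + 8
--     return False
-- ===== SOURCE B (Python) =====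
-- THINK_OPEN = "<think>"
--
-- THINK_CLOSE = "</think>"
--
--
-- def _is_inside_think(text: str, pos: int) -> bool:
--     """Single character-by-character automaton scan: walk the string with a
--     two-state DFA (outside / inside a think block), matching the tags by
--     slice comparison; test pos when a block closes, and at end of input
--     apply the unclosed-block rule."""
--     n = len(text)
--     inside = False
--     start = 0
--     i = 0
--     while i < n:
--         if inside:
--             if text[i:i + 8] == THINK_CLOSE:
--                 if start <= pos < i + 8:
--                     return True
--                 inside = False
--                 i += 8
--             else:
--                 i += 1
--         else:
--             if text[i:i + 7] == THINK_OPEN: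
--                 inside = True
--                 start = i
--                 i += 7
--             else:
--                 i += 1
--     return inside and pos >= start
-- ===== Notes on version B (the rewrite author's own statement) =====
-- stated objective: alternative
-- what changed: B replaces A's find()-driven loop (repeatedly locating whole tags and jumping between match positions) with a single character-by-character two-state automaton that walks the string once, toggling an outside/inside state on tag matches and testing pos when a block closes.
import Mathlib
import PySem

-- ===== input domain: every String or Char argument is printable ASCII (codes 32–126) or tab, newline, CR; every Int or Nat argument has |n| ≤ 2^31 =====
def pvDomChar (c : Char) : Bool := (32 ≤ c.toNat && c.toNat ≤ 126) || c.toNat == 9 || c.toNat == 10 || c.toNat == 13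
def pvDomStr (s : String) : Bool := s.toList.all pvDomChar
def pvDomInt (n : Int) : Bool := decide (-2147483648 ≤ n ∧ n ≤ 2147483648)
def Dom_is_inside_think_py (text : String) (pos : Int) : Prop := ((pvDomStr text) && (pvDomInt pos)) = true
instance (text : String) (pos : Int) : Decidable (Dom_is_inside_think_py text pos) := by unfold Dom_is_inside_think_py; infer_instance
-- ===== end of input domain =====

-- B replaces A's find-based resumable scan with a single character-by-character two-state automaton (outside/inside a think block); return value proved equal to A's everywhere (alternative decomposition, same cost).


-- ===== PORT A =====
-- A's while-loop as a fuel recursion; fuel = length + 1 always suffices, since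
-- each iteration moves sf past a closed block (≥ 15 characters forward).
def pvLoopA (text : String) (pos : Int) : Nat → Int → Bool
  | 0, _ => false
  | fuel + 1, sf =>
    let s := PySem.Str.findFrom text "<think>" sf
    if s = -1 then false
    else
      let e := PySem.Str.findFrom text "</think>" (s + 7)
      if e = -1 then decide (pos ≥ s)
      else if s ≤ pos ∧ pos < e + 8 then true
      else pvLoopA text pos fuel (e + 8)

def is_inside_think_py (text : String) (pos : Int) : Bool :=
  pvLoopA text pos (text.toList.length + 1) 0

-- ===== PORT B =====
-- B's automaton loop; the Python slice text[i:i+k] with 0 ≤ i is exactly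
-- (take k ∘ drop i) on the character list (exact on this in-range use).
def pvScanB (cs : List Char) (pos : Int) (i : Nat) (inside : Bool) (start : Int) : Bool :=
  if h : i < cs.length then
    if inside then
      if (cs.drop i).take 8 = "</think>".toList then
        if start ≤ pos ∧ pos < (i : Int) + 8 then true
        else pvScanB cs pos (i + 8) false start
      else pvScanB cs pos (i + 1) inside start
    else
      if (cs.drop i).take 7 = "<think>".toList then
        pvScanB cs pos (i + 7) true (i : Int)
      else pvScanB cs pos (i + 1) inside start
  else inside && decide (pos ≥ start)
termination_by cs.length - i
decreasing_by all_goals omega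

def is_inside_think_py_alt (text : String) (pos : Int) : Bool :=
  pvScanB text.toList pos 0 false 0

-- ===== PRECONDITION & SPEC =====
def Spec_is_inside_think_py (text : String) (pos : Int) (out : Bool) : Prop := out = is_inside_think_py_alt text pos
instance (text : String) (pos : Int) (out : Bool) : Decidable (Spec_is_inside_think_py text pos out) := by unfold Spec_is_inside_think_py; infer_instance

-- ===== CLAIM (what is proved, stated in full; the proofs are below) =====
def Claim_equal_is_inside_think_py : Prop := ∀ (text : String) (pos : Int), Dom_is_inside_think_py text pos → Spec_is_inside_think_py text pos (is_inside_think_py text pos)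

-- ===== LEMMAS AND PROOFS =====

-- No occurrence as an infix of the tail means no occurrence as a prefix at
-- any later index.
theorem pv_no_prefix_of_not_infix (cs sub : List Char) (k : Nat)
    (h : ¬ sub <:+: cs.drop k) : ∀ j, k ≤ j → ¬ sub <+: cs.drop j := by
  intro j hkj hpre
  apply h
  rw [← PySem.Chars.isIn_iff_infix, ← PySem.Chars.exists_prefix_drop_iff_isIn]
  refine ⟨j - k, ?_⟩
  rw [List.drop_drop, Nat.add_sub_cancel' hkj]
  exact hpre

-- Outside walk: while no "<think>" starts in [i, m), B's automaton just steps.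
theorem pv_walk_outside (cs : List Char) (pos : Int) (st : Int) :
    ∀ (k i m : Nat), m - i ≤ k → i ≤ m → m ≤ cs.length →
      (∀ j, i ≤ j → j < m → ¬ "<think>".toList <+: cs.drop j) →
      pvScanB cs pos i false st = pvScanB cs pos m false st := by
  intro k
  induction k with
  | zero =>
    intro i m h1 h2 _ _
    exact (show i = m by omega) ▸ rfl
  | succ n ih =>
    intro i m h1 h2 hm hno
    rcases Nat.eq_or_lt_of_le h2 with rfl | hlt
    · rfl
    · have hi : i < cs.length := by omega
      have hg : ¬ (cs.drop i).take 7 = "<think>".toList := by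
        intro he
        exact hno i le_rfl hlt (by
          rw [List.prefix_iff_eq_take]; exact he.symm)
      rw [pvScanB]
      simp only [hi, dif_pos, if_neg hg, Bool.false_eq_true]
      exact ih (i + 1) m (by omega) (by omega) hm
        (fun j hj hjm => hno j (by omega) hjm)

-- Inside walk: while no "</think>" starts in [i, m), B's automaton just steps.
theorem pv_walk_inside (cs : List Char) (pos : Int) (st : Int) :
    ∀ (k i m : Nat), m - i ≤ k → i ≤ m → m ≤ cs.length →
      (∀ j, i ≤ j → j < m → ¬ "</think>".toList <+: cs.drop j) →
      pvScanB cs pos i true st = pvScanB cs pos m true st := by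
  intro k
  induction k with
  | zero =>
    intro i m h1 h2 _ _
    exact (show i = m by omega) ▸ rfl
  | succ n ih =>
    intro i m h1 h2 hm hno
    rcases Nat.eq_or_lt_of_le h2 with rfl | hlt
    · rfl
    · have hi : i < cs.length := by omega
      have hg : ¬ (cs.drop i).take 8 = "</think>".toList := by
        intro he
        exact hno i le_rfl hlt (by
          rw [List.prefix_iff_eq_take]; exact he.symm)
      rw [pvScanB]
      simp only [hi, dif_pos, if_pos, if_neg hg]
      exact ih (i + 1) m (by omega) (by omega) hm
        (fun j hj hjm => hno j (by omega) hjm)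

-- Terminal step of the automaton.
theorem pv_scan_end (cs : List Char) (pos : Int) (inside : Bool) (st : Int) :
    pvScanB cs pos cs.length inside st = (inside && decide (pos ≥ st)) := by
  rw [pvScanB]; simp

-- Main lockstep lemma: from any resume index sf (outside state), A's
-- find-based loop and B's automaton agree, for sufficient fuel.
theorem pv_loopA_eq_scanB (text : String) (pos : Int) :
    ∀ (fuel sf : Nat) (st : Int), sf ≤ text.toList.length →
      text.toList.length - sf < fuel →
      pvLoopA text pos fuel (sf : Int) = pvScanB text.toList pos sf false st := by
  intro fuel
  induction fuel with
  | zero => intro sf st _ h; omega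
  | succ n ih =>
    intro sf st hsf _
    set cs := text.toList with hcs
    by_cases hs : PySem.Chars.findFrom cs "<think>".toList (sf : Int) = -1
    · -- no open tag: both sides false
      have hinf := (PySem.Chars.findFrom_natCast_eq_neg_one_iff cs "<think>".toList sf hsf).mp hs
      rw [pvLoopA]
      simp only [PySem.Str.findFrom_eq, ← hcs, hs]
      rw [pv_walk_outside cs pos st (cs.length - sf) sf cs.length (by omega) hsf le_rfl
        (fun j hj _ => pv_no_prefix_of_not_infix cs _ sf hinf j hj),
        pv_scan_end]
      rfl
    · have hspec := PySem.Chars.findFrom_natCast_spec cs "<think>".toList sf hsf hs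
      set s : Int := PySem.Chars.findFrom cs "<think>".toList (sf : Int) with hsdef
      obtain ⟨hks, hpre, hmin⟩ := hspec
      have hs0 : (0 : Int) ≤ s := le_trans (by exact_mod_cast Nat.zero_le sf) hks
      set sN : Nat := s.toNat with hsN
      have hsNs : (sN : Int) = s := Int.toNat_of_nonneg hs0
      have hsfN : sf ≤ sN := by omega
      have hsN7 : sN + 7 ≤ cs.length := by
        have := hpre.length_le
        simp at this
        omega
      -- B walks from sf to sN, then takes the open transition
      have hwalk1 : pvScanB cs pos sf false st = pvScanB cs pos (sN + 7) true (sN : Int) := by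
        rw [pv_walk_outside cs pos st (cs.length - sf) sf sN (by omega) hsfN (by omega)
          (fun j hj hjm => hmin j hj hjm)]
        rw [pvScanB]
        have h7 : (cs.drop sN).take 7 = "<think>".toList := by
          have := (List.prefix_iff_eq_take.mp hpre)
          simpa using this.symm
        simp [show sN < cs.length by omega, h7]
      by_cases he : PySem.Chars.findFrom cs "</think>".toList ((sN : Int) + 7) = -1
      · -- unclosed open tag: both sides 'pos ≥ s'
        have he' : PySem.Chars.findFrom cs "</think>".toList (((sN + 7 : Nat)) : Int) = -1 := by
          push_cast; exact he
        have hinf := (PySem.Chars.findFrom_natCast_eq_neg_one_iff cs "</think>".toList (sN + 7) hsN7).mp he'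
        rw [pvLoopA]
        simp only [PySem.Str.findFrom_eq, ← hcs, ← hsdef]
        rw [if_neg hs]
        have hcast : s + 7 = (((sN + 7 : Nat)) : Int) := by push_cast; omega
        rw [hcast, if_pos he']
        rw [hwalk1,
          pv_walk_inside cs pos (sN : Int) (cs.length - (sN + 7)) (sN + 7) cs.length
            (by omega) (by omega) le_rfl
            (fun j hj _ => pv_no_prefix_of_not_infix cs _ (sN + 7) hinf j hj),
          pv_scan_end]
        simp [hsNs]
      · have he' : PySem.Chars.findFrom cs "</think>".toList (((sN + 7 : Nat)) : Int) ≠ -1 := by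
          push_cast; exact he
        have hespec := PySem.Chars.findFrom_natCast_spec cs "</think>".toList (sN + 7) hsN7 he'
        set e : Int := PySem.Chars.findFrom cs "</think>".toList (((sN + 7 : Nat)) : Int) with hedef
        obtain ⟨hke, hepre, hemin⟩ := hespec
        have he0 : (0 : Int) ≤ e := le_trans (by exact_mod_cast Nat.zero_le (sN + 7)) hke
        set eN : Nat := e.toNat with heN
        have heNe : (eN : Int) = e := Int.toNat_of_nonneg he0
        have heN8 : eN + 8 ≤ cs.length := by
          have := hepre.length_le
          simp at this
          omega
        have hwalk2 : pvScanB cs pos (sN + 7) true (sN : Int) = pvScanB cs pos eN true (sN : Int) := by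
          exact pv_walk_inside cs pos (sN : Int) (cs.length - (sN + 7)) (sN + 7) eN
            (by omega) (by omega) (by omega) (fun j hj hjm => hemin j hj hjm)
        have h8 : (cs.drop eN).take 8 = "</think>".toList := by
          have := (List.prefix_iff_eq_take.mp hepre)
          simpa using this.symm
        rw [pvLoopA]
        simp only [PySem.Str.findFrom_eq, ← hcs, ← hsdef, if_neg hs]
        have hcast : s + 7 = (((sN + 7 : Nat)) : Int) := by push_cast; omega
        rw [hcast, ← hedef, if_neg he']
        rw [hwalk1, hwalk2, pvScanB]
        simp only [show eN < cs.length by omega, dif_pos, if_true, h8]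
        by_cases hc : s ≤ pos ∧ pos < e + 8
        · have hc' : (sN : Int) ≤ pos ∧ pos < (eN : Int) + 8 := by
            rw [hsNs, heNe]; exact hc
          rw [if_pos hc, if_pos hc']
        · have hc' : ¬ ((sN : Int) ≤ pos ∧ pos < (eN : Int) + 8) := by
            rw [hsNs, heNe]; exact hc
          rw [if_neg hc, if_neg hc']
          have : e + 8 = (((eN + 8 : Nat)) : Int) := by push_cast; omega
          rw [this]
          exact ih (eN + 8) (sN : Int) (by omega) (by omega)

-- ===== VERDICT (by name: the statement is the Claim_ definition above) =====
theorem is_inside_think_py_spec : Claim_equal_is_inside_think_py := by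
  intro text pos _
  unfold Spec_is_inside_think_py is_inside_think_py is_inside_think_py_alt
  exact pv_loopA_eq_scanB text pos (text.toList.length + 1) 0 0 (Nat.zero_le _) (by omega)
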